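-- pv_equiv track=rewrite | github.com/molly-101/Algorithm | KAKAO_INTERNSHIP_2019/Hotel_Room.py | solution
-- ===== SOURCE A (Python) =====
-- def solution(k, room_number):
--     memo = {}
--     result = []
--
--     for num in room_number:
--         if memo.get(num, 0) == 0:
--             memo[num] = num + 1
--         else:
--             tmp = [num]  # save route
--
--             while memo.get(num, 0) != 0:
--                 num = memo[num]
--                 tmp.append(num)
--
--             for i in tmp:
--                 memo[i] = num + 1
--
--             memo[num] = num + 1
--
--         result.append(num)
--
--     return result
-- ===== SOURCE B (Python) =====
-- def solution(k, room_number):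
--     occupied = set()
--     result = []
--     for num in room_number:
--         room = num
--         while room in occupied:
--             room += 1
--         occupied.add(room)
--         result.append(room)
--     return result
-- ===== Notes on version B (the rewrite author's own statement) =====
-- stated objective: simpler
-- what changed: Replaces A's union-find next-pointer table with path compression by a plain occupied-set and upward linear probing (room += 1 until free), which is shorter and obviously correct; Pre_ excludes exactly the request lists that force a probe upward past room -1 (some interval [m,-1] receiving more requests than it has rooms), where A's sentinel memo.get(num,0)==0 reads the stored pointer -1+1=0 for room -1 as free and hands out already-assigned rooms more than once, a value B's set-based probing does not reproduce.
-- outside the precondition, e.g. on solution(0, [-1, -1]): A returns [-1, -1], B returns [-1, 0]; on solution(0, [-2, -2, -2]): A returns [-2, -1, -2], B returns [-2, -1, 0]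
import Mathlib
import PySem

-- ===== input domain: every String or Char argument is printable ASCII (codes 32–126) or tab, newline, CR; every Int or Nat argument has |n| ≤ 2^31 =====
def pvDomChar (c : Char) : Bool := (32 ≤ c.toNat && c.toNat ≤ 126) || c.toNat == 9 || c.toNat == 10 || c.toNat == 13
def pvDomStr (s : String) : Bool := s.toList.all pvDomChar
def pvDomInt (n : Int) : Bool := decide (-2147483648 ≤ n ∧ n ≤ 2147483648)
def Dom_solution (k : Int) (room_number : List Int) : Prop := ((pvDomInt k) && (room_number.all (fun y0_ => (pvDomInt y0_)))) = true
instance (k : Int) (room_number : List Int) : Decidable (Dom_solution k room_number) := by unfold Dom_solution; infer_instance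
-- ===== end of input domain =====

-- B replaces A's union-find pointer table (with path compression) by a plain occupied-set
-- and upward linear probing: simpler, and it assigns each room at most once (see Pre_solution).

-- ===== PORT A =====
-- the `while memo.get(num, 0) != 0` loop; fuel is a termination guard only: the loop visits
-- strictly increasing keys of `memo`, so `memo.size + 1` steps always suffice in reachable runs
def followA (memo : PySem.Dict Int Int) : Nat → Int → List Int → List Int × Int
  | 0, num, tmp => (tmp, num)
  | fuel + 1, num, tmp =>
    if memo.getD num 0 ≠ 0 then
      followA memo fuel (memo.getD num 0) (tmp ++ [memo.getD num 0])
    else (tmp, num)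

def stepA (st : PySem.Dict Int Int × List Int) (num : Int) : PySem.Dict Int Int × List Int :=
  if st.1.getD num 0 = 0 then
    (st.1.insert num (num + 1), st.2 ++ [num])
  else
    let p := followA st.1 (st.1.size + 1) num [num]
    let memo1 := p.1.foldl (fun m i => m.insert i (p.2 + 1)) st.1
    (memo1.insert p.2 (p.2 + 1), st.2 ++ [p.2])

def solution (k : Int) (room_number : List Int) : List Int :=
  (room_number.foldl stepA (PySem.Dict.empty, [])).2

-- ===== PORT B =====
-- the `while room in occupied: room += 1` loop; fuel is a termination guard only: each step
-- consumes a distinct member of `occupied`, so `occupied.length + 1` steps always suffice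
def probeB (occupied : PySem.Set Int) : Nat → Int → Int
  | 0, room => room
  | fuel + 1, room =>
    if PySem.Set.contains occupied room then probeB occupied fuel (room + 1) else room

def stepB (st : PySem.Set Int × List Int) (num : Int) : PySem.Set Int × List Int :=
  let room := probeB st.1 (st.1.length + 1) num
  (PySem.Set.add st.1 room, st.2 ++ [room])

def solution_alt (k : Int) (room_number : List Int) : List Int :=
  (room_number.foldl stepB (PySem.Set.empty, [])).2

-- ===== PRECONDITION & SPEC =====
-- Pre_ excludes exactly the request lists that force a probe upward past room -1 (some
-- interval [m, -1] receiving more requests than it has rooms): on those inputs A's sentinel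
-- `memo.get(num, 0) == 0` reads the stored pointer -1 + 1 = 0 for room -1 as "free" and hands
-- out room -1 (and rooms on its compressed chain) more than once (A [-1, -1] = [-1, -1]),
-- a value a room-assignment re-implementation should not match (B gives [-1, 0]).
def Pre_solution (k : Int) (room_number : List Int) : Prop :=
  ¬ ∃ m ∈ room_number, m ≤ -1 ∧
    (-m + 1) ≤ ((room_number.filter (fun x => decide (m ≤ x ∧ x ≤ -1))).length : Int)
instance (k : Int) (room_number : List Int) : Decidable (Pre_solution k room_number) := by
  unfold Pre_solution; infer_instance

def pvWitness_solution : Int × List Int := (0, [0, 1, 0, -2])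

def Spec_solution (k : Int) (room_number : List Int) (out : List Int) : Prop :=
  out = solution_alt k room_number
instance (k : Int) (room_number : List Int) (out : List Int) : Decidable (Spec_solution k room_number out) := by
  unfold Spec_solution; infer_instance

-- ===== CLAIM (what is proved, stated in full; the proofs are below) =====
def Claim_equal_solution : Prop := ∀ (k : Int) (room_number : List Int), Dom_solution k room_number → Pre_solution k room_number → Spec_solution k room_number (solution k room_number)

-- ===== LEMMAS AND PROOFS =====

-- invariant tying A's pointer table to B's occupied set:
-- every stored pointer p = memo[r] with p ≠ 0 jumps over occupied rooms only (rooms [r, p-1]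
-- are occupied), a stored 0 marks a room ≤ -1 whose whole stretch up to -1 is occupied,
-- keys of memo are exactly the occupied rooms, and memo is at least as large as occ
def DInv (memo : PySem.Dict Int Int) (occ : List Int) : Prop :=
  (∀ r p : Int, memo.get? r = some p →
     (p = 0 → r ≤ -1 ∧ ∀ s : Int, r ≤ s → s ≤ -1 → s ∈ occ) ∧
     (p ≠ 0 → r < p ∧ ∀ s : Int, r ≤ s → s < p → s ∈ occ)) ∧
  (∀ r : Int, r ∈ occ ↔ (memo.get? r).isSome) ∧
  occ.length ≤ memo.size

-- parking-style counting invariant: a fully occupied stretch [m, s] with m-1 free forced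
-- at least s - m + 1 of the processed requests to lie inside [m, s]
def CInv (processed occ : List Int) : Prop :=
  ∀ m s : Int, m ≤ s → (∀ t : Int, m ≤ t → t ≤ s → t ∈ occ) → (m - 1) ∉ occ →
    s - m + 1 ≤ ((processed.filter (fun x => decide (m ≤ x ∧ x ≤ s))).length : Int)

lemma filt_len_le (l : List Int) (p q : Int → Bool) (h : ∀ x ∈ l, p x = true → q x = true) :
    (l.filter p).length ≤ (l.filter q).length := by
  induction l with
  | nil => simp
  | cons a l ih =>
    have ih' := ih (fun x hx => h x (List.mem_cons_of_mem _ hx))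
    by_cases hpa : p a = true
    · have := h a (List.mem_cons_self) hpa
      simp [hpa, this]; omega
    · by_cases hqa : q a = true <;> simp [hpa, hqa] <;> omega

lemma filt_len_lt (l : List Int) (p q : Int → Bool) (h : ∀ x ∈ l, p x = true → q x = true)
    (a : Int) (ha : a ∈ l) (hqa : q a = true) (hpa : ¬ p a = true) :
    (l.filter p).length < (l.filter q).length := by
  induction l with
  | nil => simp at ha
  | cons b l ih =>
    have h' : ∀ x ∈ l, p x = true → q x = true := fun x hx => h x (List.mem_cons_of_mem _ hx)
    rcases List.mem_cons.1 ha with rfl | ha'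
    · have hle := filt_len_le l p q h'
      simp [hpa, hqa]; omega
    · have := ih h' ha'
      by_cases hpb : p b = true
      · have := h b (List.mem_cons_self) hpb
        simp [hpb, this]; omega
      · by_cases hqb : q b = true <;> simp [hpb, hqb] <;> omega

lemma dict_contains_eq_isSome (d : PySem.Dict Int Int) (k : Int) :
    d.contains k = (d.get? k).isSome := by
  simp only [PySem.Dict.contains, PySem.Dict.get?, Option.isSome_map]
  induction d.items with
  | nil => rfl
  | cons a l ih => by_cases h : a.1 == k <;> simp [h, ih]

lemma size_insert_mono (d : PySem.Dict Int Int) (k v : Int) : d.size ≤ (d.insert k v).size := by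
  simp only [PySem.Dict.insert, PySem.Dict.size]
  split_ifs <;> simp

lemma size_insert_new (d : PySem.Dict Int Int) (k v : Int) (h : d.get? k = none) :
    d.size + 1 ≤ (d.insert k v).size := by
  have hc : d.contains k = false := by
    rw [dict_contains_eq_isSome, h]; rfl
  simp only [PySem.Dict.insert, hc, PySem.Dict.size]
  simp

lemma size_foldl_insert_mono (tmp : List Int) (v : Int) :
    ∀ (m : PySem.Dict Int Int), m.size ≤ (tmp.foldl (fun m i => m.insert i v) m).size := by
  induction tmp with
  | nil => intro m; simp
  | cons a tmp ih =>
    intro m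
    exact le_trans (size_insert_mono m a v) (ih (m.insert a v))

lemma size_gain (tmp : List Int) (v w r : Int) :
    ∀ (m : PySem.Dict Int Int), m.get? r = none →
      m.size + 1 ≤ ((tmp.foldl (fun m i => m.insert i v) m).insert r w).size := by
  induction tmp with
  | nil =>
    intro m h
    simpa using size_insert_new m r w h
  | cons a tmp ih =>
    intro m h
    by_cases har : a = r
    · subst har
      have h1 : m.size + 1 ≤ (m.insert a v).size := size_insert_new m a v h
      have h2 := size_foldl_insert_mono tmp v (m.insert a v)
      have h3 := size_insert_mono (tmp.foldl (fun m i => m.insert i v) (m.insert a v)) a w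
      simp only [List.foldl_cons]
      omega
    · have h' : (m.insert a v).get? r = none := by
        rw [PySem.Dict.get?_insert_of_ne _ _ (Ne.symm har)]; exact h
      have := ih (m.insert a v) h'
      have h1 : m.size ≤ (m.insert a v).size := size_insert_mono m a v
      simp only [List.foldl_cons]
      omega

lemma get?_foldl_insert (tmp : List Int) (v : Int) :
    ∀ (m : PySem.Dict Int Int) (x : Int),
      ((tmp.foldl (fun m i => m.insert i v) m).get? x) =
        if x ∈ tmp then some v else m.get? x := by
  induction tmp with
  | nil => intro m x; simp
  | cons a tmp ih =>
    intro m x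
    simp only [List.foldl_cons]
    rw [ih]
    by_cases hx : x ∈ tmp
    · simp [hx, List.mem_cons.2 (Or.inr hx)]
    · by_cases hxa : x = a
      · subst hxa
        simp [hx, PySem.Dict.get?_insert_self]
      · simp [hx, hxa, PySem.Dict.get?_insert_of_ne _ _ hxa]

lemma count_split (l : List Int) (m r s : Int) (hmr : m ≤ r) (hrs : r ≤ s) :
    (l.filter (fun x => decide (m ≤ x ∧ x ≤ r - 1))).length
      + (l.filter (fun x => decide (r + 1 ≤ x ∧ x ≤ s))).length
      ≤ (l.filter (fun x => decide (m ≤ x ∧ x ≤ s))).length := by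
  induction l with
  | nil => simp
  | cons a l ih =>
    simp only [List.filter_cons]
    split_ifs with h1 h2 h3 h2 h3 h3 <;> simp_all <;> omega

lemma probeB_spec (occ : List Int) : ∀ (fuel : Nat) (num r : Int), num ≤ r →
    (∀ s : Int, num ≤ s → s < r → s ∈ occ) → r ∉ occ →
    (occ.filter (fun x => decide (num ≤ x))).length < fuel →
    probeB occ fuel num = r := by
  intro fuel
  induction fuel with
  | zero => intro num r _ _ _ hf; omega
  | succ f ih =>
    intro num r hnr hcov hr hf
    by_cases hnum : num ∈ occ
    · have hc : PySem.Set.contains occ num = true := (PySem.Set.contains_iff occ num).2 hnum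
      have hne : num ≠ r := fun h => hr (h ▸ hnum)
      have hlt : num < r := lt_of_le_of_ne hnr hne
      have hstrict : (occ.filter (fun x => decide (num + 1 ≤ x))).length
          < (occ.filter (fun x => decide (num ≤ x))).length := by
        apply filt_len_lt occ _ _ _ num hnum
        · simp
        · simp
        · intro x hx hp
          simp at hp ⊢; omega
      simp only [probeB, hc, if_true]
      exact ih (num + 1) r hlt (fun s hs1 hs2 => hcov s (by omega) hs2) hr (by omega)
    · have hc : PySem.Set.contains occ num = false := by
        by_contra h
        exact hnum ((PySem.Set.contains_iff occ num).1 (by simpa using h))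
      simp only [probeB, hc]
      rcases lt_or_eq_of_le hnr with hlt | rfl
      · exact absurd (hcov num le_rfl hlt) hnum
      · simp

lemma cinv_step (processed occ : List Int) (v r : Int) (h : CInv processed occ)
    (hvr : v ≤ r) (hcov : ∀ s : Int, v ≤ s → s < r → s ∈ occ) (hr : r ∉ occ) :
    CInv (processed ++ [v]) (occ ++ [r]) := by
  intro m s hms hcov' hfree'
  have hfree : (m - 1) ∉ occ := fun h' => hfree' (List.mem_append.2 (Or.inl h'))
  have hmr : m - 1 ≠ r := fun h' => hfree' (by simp [h'])
  by_cases hin : m ≤ r ∧ r ≤ s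
  · obtain ⟨hmr', hrs⟩ := hin
    have hvm : m ≤ v := by
      by_contra hvm
      rw [not_le] at hvm
      have : (m - 1) ∈ occ := hcov (m - 1) (by omega) (by omega)
      exact hfree this
    have hvs : v ≤ s := by omega
    have hleft : m ≤ r - 1 → (r - 1) - m + 1 ≤
        ((processed.filter (fun x => decide (m ≤ x ∧ x ≤ r - 1))).length : Int) := by
      intro hmr1
      apply h m (r - 1) hmr1
      · intro t ht1 ht2
        have := hcov' t ht1 (by omega)
        rcases List.mem_append.1 this with h' | h'
        · exact h'
        · simp at h'; omega
      · exact hfree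
    have hright : r + 1 ≤ s → s - (r + 1) + 1 ≤
        ((processed.filter (fun x => decide (r + 1 ≤ x ∧ x ≤ s))).length : Int) := by
      intro hrs1
      apply h (r + 1) s hrs1
      · intro t ht1 ht2
        have := hcov' t (by omega) ht2
        rcases List.mem_append.1 this with h' | h'
        · exact h'
        · simp at h'; omega
      · simpa using hr
    have hsplit := count_split processed m r s hmr' hrs
    have hvcount : ((processed ++ [v]).filter (fun x => decide (m ≤ x ∧ x ≤ s))).length
        = (processed.filter (fun x => decide (m ≤ x ∧ x ≤ s))).length + 1 := by
      simp [List.filter_append, hvm, hvs]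
    rw [hvcount]
    by_cases hc1 : m ≤ r - 1
    · by_cases hc2 : r + 1 ≤ s
      · have := hleft hc1; have := hright hc2; push_cast; omega
      · have := hleft hc1
        have : s = r := by omega
        push_cast; omega
    · by_cases hc2 : r + 1 ≤ s
      · have := hright hc2
        have : m = r := by omega
        push_cast; omega
      · have : m = r ∧ s = r := by omega
        push_cast; omega
  · have hcovocc : ∀ t : Int, m ≤ t → t ≤ s → t ∈ occ := by
      intro t ht1 ht2
      rcases List.mem_append.1 (hcov' t ht1 ht2) with h' | h'
      · exact h'
      · simp at h'; exfalso; apply hin; omega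
    have := h m s hms hcovocc hfree
    have hmono : (processed.filter (fun x => decide (m ≤ x ∧ x ≤ s))).length
        ≤ ((processed ++ [v]).filter (fun x => decide (m ≤ x ∧ x ≤ s))).length := by
      simp only [List.filter_append, List.length_append]; omega
    have hmono' : ((processed.filter (fun x => decide (m ≤ x ∧ x ≤ s))).length : Int)
        ≤ (((processed ++ [v]).filter (fun x => decide (m ≤ x ∧ x ≤ s))).length : Int) := by
      exact_mod_cast hmono
    omega

lemma exists_min (l : List Int) (h : l ≠ []) : ∃ m ∈ l, ∀ x ∈ l, m ≤ x := by
  induction l with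
  | nil => simp at h
  | cons a l ih =>
    rcases eq_or_ne l [] with rfl | hl
    · exact ⟨a, by simp⟩
    · obtain ⟨m, hm, hmin⟩ := ih hl
      rcases le_total a m with hle | hle
      · exact ⟨a, by simp, by
          intro x hx
          rcases List.mem_cons.1 hx with rfl | hx'
          · exact le_rfl
          · exact le_trans hle (hmin x hx')⟩
      · exact ⟨m, List.mem_cons_of_mem _ hm, by
          intro x hx
          rcases List.mem_cons.1 hx with rfl | hx'
          · exact hle
          · exact hmin x hx'⟩

lemma find_left_free (occ : List Int) : ∀ (n : Nat) (v : Int), v ≤ -1 →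
    (∀ s : Int, v ≤ s → s ≤ -1 → s ∈ occ) →
    (occ.filter (fun x => decide (x < v))).length ≤ n →
    ∃ m : Int, m ≤ v ∧ (∀ s : Int, m ≤ s → s ≤ -1 → s ∈ occ) ∧ (m - 1) ∉ occ := by
  intro n
  induction n with
  | zero =>
    intro v hv hcov hf
    by_cases hm : (v - 1) ∈ occ
    · exfalso
      have : 1 ≤ (occ.filter (fun x => decide (x < v))).length := by
        have : (v - 1) ∈ occ.filter (fun x => decide (x < v)) :=
          List.mem_filter.2 ⟨hm, by simp⟩
        exact List.length_pos_iff.2 (List.ne_nil_of_mem this)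
      omega
    · exact ⟨v, le_rfl, hcov, hm⟩
  | succ n ih =>
    intro v hv hcov hf
    by_cases hm : (v - 1) ∈ occ
    · have hcov' : ∀ s : Int, v - 1 ≤ s → s ≤ -1 → s ∈ occ := by
        intro s hs1 hs2
        rcases eq_or_lt_of_le hs1 with rfl | hlt
        · exact hm
        · exact hcov s (by omega) hs2
      have hstrict : (occ.filter (fun x => decide (x < v - 1))).length
          < (occ.filter (fun x => decide (x < v))).length := by
        apply filt_len_lt occ _ _ _ (v - 1) hm
        · simp
        · simp
        · intro x hx hp; simp at hp ⊢; omega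
      obtain ⟨m, h1, h2, h3⟩ := ih (v - 1) (by omega) hcov' (by omega)
      exact ⟨m, by omega, h2, h3⟩
    · exact ⟨v, le_rfl, hcov, hm⟩

lemma derive_overflow (processed rest occ : List Int) (num : Int)
    (hC : CInv processed occ) (hnum : num ≤ -1)
    (hcov : ∀ s : Int, num ≤ s → s ≤ -1 → s ∈ occ) :
    ¬ Pre_solution 0 (processed ++ num :: rest) := by
  intro hpre
  apply hpre
  obtain ⟨m, hmv, hmcov, hmfree⟩ :=
    find_left_free occ occ.length num hnum hcov (by
      simpa using List.length_filter_le _ occ)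
  have hm1 : m ≤ -1 := by omega
  have hcount := hC m (-1) hm1 hmcov hmfree
  set full := processed ++ num :: rest with hfull
  set P : Int → Bool := fun x => decide (m ≤ x ∧ x ≤ -1) with hP
  have hnumP : P num = true := by simp [hP]; omega
  have hcountfull : (-m) + 1 ≤ ((full.filter P).length : Int) := by
    have : full.filter P = processed.filter P ++ (num :: rest).filter P := List.filter_append _ _
    have h1 : 1 ≤ ((num :: rest).filter P).length := by
      have : num ∈ (num :: rest).filter P := List.mem_filter.2 ⟨List.mem_cons_self, hnumP⟩
      exact List.length_pos_iff.2 (List.ne_nil_of_mem this)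
    have h2 : (full.filter P).length = (processed.filter P).length + ((num :: rest).filter P).length := by
      rw [this]; simp
    have := hcount
    push_cast at *
    omega
  have hne : full.filter P ≠ [] := by
    intro h
    rw [h] at hcountfull
    simp at hcountfull
    omega
  obtain ⟨m', hm'mem, hm'min⟩ := exists_min _ hne
  have hm'filter := List.mem_filter.1 hm'mem
  have hm'full : m' ∈ full := hm'filter.1
  have hm'P : m ≤ m' ∧ m' ≤ -1 := by simpa [hP] using hm'filter.2
  refine ⟨m', hm'full, hm'P.2, ?_⟩
  have hcongr : full.filter (fun x => decide (m' ≤ x ∧ x ≤ -1)) = full.filter P := by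
    apply List.filter_congr
    intro x hx
    simp only [hP, decide_eq_decide]
    constructor
    · intro ⟨h1, h2⟩; exact ⟨by omega, h2⟩
    · intro ⟨h1, h2⟩
      have : x ∈ full.filter P := List.mem_filter.2 ⟨hx, by simp [hP]; omega⟩
      exact ⟨hm'min x this, h2⟩
  rw [hcongr]
  omega

lemma followA_spec (memo : PySem.Dict Int Int) (occ : List Int) (hI : DInv memo occ) :
    ∀ (fuel : Nat) (cur : Int) (tmp : List Int),
      (occ.filter (fun x => decide (cur ≤ x))).length < fuel →
      cur ≤ (followA memo fuel cur tmp).2 ∧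
      (∀ s : Int, cur ≤ s → s < (followA memo fuel cur tmp).2 → s ∈ occ) ∧
      (∀ t, t ∈ (followA memo fuel cur tmp).1 → t ∈ tmp ∨ (cur ≤ t ∧ t ≤ (followA memo fuel cur tmp).2)) ∧
      ((followA memo fuel cur tmp).2 ∉ occ ∨
        ((followA memo fuel cur tmp).2 ≤ -1 ∧
          ∀ s : Int, (followA memo fuel cur tmp).2 ≤ s → s ≤ -1 → s ∈ occ)) := by
  intro fuel
  induction fuel with
  | zero => intro cur tmp hf; omega
  | succ f ih =>
    intro cur tmp hf
    by_cases hq : memo.getD cur 0 ≠ 0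
    · have hget0 : ∀ p : Int, memo.get? cur = some p → memo.getD cur 0 = p := by
        intro p hp; simp [PySem.Dict.getD, hp]
      have hgetsome : ∃ p : Int, memo.get? cur = some p := by
        rcases h : memo.get? cur with _ | p
        · exfalso; apply hq; simp [PySem.Dict.getD, h]
        · exact ⟨p, rfl⟩
      obtain ⟨qq, hgetq⟩ := hgetsome
      set q := memo.getD cur 0 with hqdef
      have hget : memo.get? cur = some q := by
        rw [hgetq, hget0 qq hgetq]
      have hfacts := ((hI.1 cur q hget).2 hq)
      have hcurq : cur < q := hfacts.1
      have hcov1 : ∀ s : Int, cur ≤ s → s < q → s ∈ occ := hfacts.2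
      have hcur_occ : cur ∈ occ := hcov1 cur le_rfl hcurq
      have hstrict : (occ.filter (fun x => decide (q ≤ x))).length
          < (occ.filter (fun x => decide (cur ≤ x))).length := by
        apply filt_len_lt occ _ _ _ cur hcur_occ
        · simp
        · simp; omega
        · intro x hx hp; simp at hp ⊢; omega
      have hrec := ih q (tmp ++ [q]) (by omega)
      have hstep : followA memo (f + 1) cur tmp = followA memo f q (tmp ++ [q]) := by
        rw [followA]
        simp only [← hqdef]
        rw [if_pos hq]
      rw [hstep]
      obtain ⟨h1, h2, h3, h4⟩ := hrec
      refine ⟨by omega, ?_, ?_, h4⟩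
      · intro s hs1 hs2
        by_cases hsq : s < q
        · exact hcov1 s hs1 hsq
        · exact h2 s (by omega) hs2
      · intro t ht
        rcases h3 t ht with ht' | ht'
        · rcases List.mem_append.1 ht' with h' | h'
          · exact Or.inl h'
          · simp at h'
            subst h'
            exact Or.inr ⟨by omega, by omega⟩
        · exact Or.inr ⟨by omega, ht'.2⟩
    · rw [not_not] at hq
      have hstep : followA memo (f + 1) cur tmp = (tmp, cur) := by
        rw [followA]
        rw [if_neg (by simpa using hq)]
      rw [hstep]
      refine ⟨le_rfl, by intro s h1 h2; omega, by intro t ht; exact Or.inl ht, ?_⟩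
      by_cases hin : cur ∈ occ
      · right
        have hsome : (memo.get? cur).isSome := (hI.2.1 cur).1 hin
        rcases h : memo.get? cur with _ | p
        · rw [h] at hsome; simp at hsome
        · have hp0 : p = 0 := by
            have : memo.getD cur 0 = p := by simp [PySem.Dict.getD, h]
            omega
          subst hp0
          exact (hI.1 cur 0 h).1 rfl
      · exact Or.inl hin

lemma loop_eq : ∀ (rest processed : List Int) (memo : PySem.Dict Int Int) (occ : List Int)
    (res : List Int), DInv memo occ → CInv processed occ →
    Pre_solution 0 (processed ++ rest) →
    (rest.foldl stepA (memo, res)).2 = (rest.foldl stepB (occ, res)).2 := by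
  intro rest
  induction rest with
  | nil => intro processed memo occ res _ _ _; rfl
  | cons num rest ih =>
    intro processed memo occ res hI hC hD
    have hassoc : processed ++ num :: rest = (processed ++ [num]) ++ rest := by simp
    simp only [List.foldl_cons]
    by_cases hA : memo.getD num 0 = 0
    · -- A's free branch
      have hnotin : num ∉ occ := by
        intro hin
        have hsome : (memo.get? num).isSome := (hI.2.1 num).1 hin
        rcases h : memo.get? num with _ | p
        · rw [h] at hsome; simp at hsome
        · have hp : memo.getD num 0 = p := by simp [PySem.Dict.getD, h]
          have hp0 : p = 0 := by omega
          subst hp0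
          obtain ⟨hle, hcov⟩ := (hI.1 num 0 h).1 rfl
          exact (derive_overflow processed rest occ num hC hle hcov) hD
      have hnone : memo.get? num = none := by
        rcases h : memo.get? num with _ | p
        · rfl
        · exact absurd ((hI.2.1 num).2 (by rw [h]; rfl)) hnotin
      have hroom : probeB occ (occ.length + 1) num = num := by
        apply probeB_spec occ (occ.length + 1) num num le_rfl
          (by intro s h1 h2; omega) hnotin
        have := List.length_filter_le (fun x => decide (num ≤ x)) occ
        omega
      have hstepA : stepA (memo, res) num = (memo.insert num (num + 1), res ++ [num]) := by
        simp [stepA, hA]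
      have hstepB : stepB (occ, res) num = (occ ++ [num], res ++ [num]) := by
        simp [stepB, hroom, PySem.Set.add, hnotin]
      rw [hstepA, hstepB]
      apply ih (processed ++ [num]) _ _ _
      · -- DInv for the new state
        refine ⟨?_, ?_, ?_⟩
        · intro x p hp
          by_cases hx : x = num
          · subst hx
            rw [PySem.Dict.get?_insert_self] at hp
            have hpv : p = x + 1 := (Option.some.inj hp).symm
            subst hpv
            constructor
            · intro h0
              have hx1 : x = -1 := by omega
              refine ⟨by omega, ?_⟩
              intro s h1 h2
              have : s = x := by omega
              subst this
              simp
            · intro h0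
              refine ⟨by omega, ?_⟩
              intro s h1 h2
              have : s = x := by omega
              subst this
              simp
          · rw [PySem.Dict.get?_insert_of_ne _ _ hx] at hp
            have := hI.1 x p hp
            constructor
            · intro h0
              obtain ⟨ha, hb⟩ := this.1 h0
              exact ⟨ha, fun s h1 h2 => List.mem_append.2 (Or.inl (hb s h1 h2))⟩
            · intro h0
              obtain ⟨ha, hb⟩ := this.2 h0
              exact ⟨ha, fun s h1 h2 => List.mem_append.2 (Or.inl (hb s h1 h2))⟩
        · intro x
          by_cases hx : x = num
          · subst hx
            simp [PySem.Dict.get?_insert_self]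
          · rw [PySem.Dict.get?_insert_of_ne _ _ hx]
            constructor
            · intro hmem
              rcases List.mem_append.1 hmem with h' | h'
              · exact (hI.2.1 x).1 h'
              · simp at h'; exact absurd h' hx
            · intro hsome
              exact List.mem_append.2 (Or.inl ((hI.2.1 x).2 hsome))
        · have := size_insert_new memo num (num + 1) hnone
          have h2' := hI.2.2
          simp only [List.length_append, List.length_cons, List.length_nil]
          omega
      · exact cinv_step processed occ num num hC le_rfl (by intro s h1 h2; omega) hnotin
      · rw [← hassoc]; exact hD
    · -- A's taken branch: follow the pointer chain
      have hget0 : ∀ p : Int, memo.get? num = some p → memo.getD num 0 = p := by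
        intro p hp; simp [PySem.Dict.getD, hp]
      have hgetsome : ∃ p : Int, memo.get? num = some p := by
        rcases h : memo.get? num with _ | p
        · exfalso; apply hA; simp [PySem.Dict.getD, h]
        · exact ⟨p, rfl⟩
      obtain ⟨q, hgetq⟩ := hgetsome
      have hnum_occ : num ∈ occ := (hI.2.1 num).2 (by rw [hgetq]; rfl)
      have hfuel : (occ.filter (fun x => decide (num ≤ x))).length < memo.size + 1 := by
        have h1 := List.length_filter_le (fun x => decide (num ≤ x)) occ
        have h2 := hI.2.2
        omega
      obtain ⟨h1, h2, h3, h4⟩ := followA_spec memo occ hI (memo.size + 1) num [num] hfuel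
      set out := followA memo (memo.size + 1) num [num] with hout
      set r := out.2 with hr
      have hrnot : r ∉ occ := by
        rcases h4 with h4 | ⟨h4a, h4b⟩
        · exact h4
        · exfalso
          refine derive_overflow processed rest occ num hC (by omega) ?_ hD
          intro s hs1 hs2
          by_cases hsr : s < r
          · exact h2 s hs1 hsr
          · exact h4b s (by omega) hs2
      have hroom : probeB occ (occ.length + 1) num = r := by
        apply probeB_spec occ (occ.length + 1) num r h1 h2 hrnot
        have := List.length_filter_le (fun x => decide (num ≤ x)) occ
        omega
      have hstepA : stepA (memo, res) num =
          ((out.1.foldl (fun m i => m.insert i (r + 1)) memo).insert r (r + 1), res ++ [r]) := by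
        simp only [stepA]
        rw [if_neg hA]
      have hstepB : stepB (occ, res) num = (occ ++ [r], res ++ [r]) := by
        simp [stepB, hroom, PySem.Set.add, hrnot]
      rw [hstepA, hstepB]
      set memoA := (out.1.foldl (fun m i => m.insert i (r + 1)) memo).insert r (r + 1) with hmemoA
      have hrangeout : ∀ t, t ∈ out.1 → num ≤ t ∧ t ≤ r := by
        intro t ht
        rcases h3 t ht with ht' | ht'
        · simp at ht'; subst ht'; exact ⟨le_rfl, h1⟩
        · exact ht'
      have hchar : ∀ x : Int, memoA.get? x =
          if x = r then some (r + 1) else if x ∈ out.1 then some (r + 1) else memo.get? x := by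
        intro x
        by_cases hx : x = r
        · subst hx; simp [hmemoA, PySem.Dict.get?_insert_self]
        · rw [hmemoA, PySem.Dict.get?_insert_of_ne _ _ hx, get?_foldl_insert]
          simp [hx]
      apply ih (processed ++ [num]) _ _ _
      · refine ⟨?_, ?_, ?_⟩
        · intro x p hp
          rw [hchar x] at hp
          by_cases hx : x = r
          · rw [if_pos hx] at hp
            have hpv : p = r + 1 := (Option.some.inj hp).symm
            subst hpv
            subst hx
            constructor
            · intro h0
              refine ⟨by omega, ?_⟩
              intro s hs1 hs2
              have hsx : s = r := by omega
              subst hsx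
              exact List.mem_append.2 (Or.inr (by simp))
            · intro h0
              refine ⟨by omega, ?_⟩
              intro s hs1 hs2
              have hsx : s = r := by omega
              subst hsx
              exact List.mem_append.2 (Or.inr (by simp))
          · rw [if_neg hx] at hp
            by_cases hmem : x ∈ out.1
            · rw [if_pos hmem] at hp
              have hpv : p = r + 1 := (Option.some.inj hp).symm
              subst hpv
              obtain ⟨hx1, hx2⟩ := hrangeout x hmem
              constructor
              · intro h0
                refine ⟨by omega, ?_⟩
                intro s hs1 hs2
                by_cases hsr : s < r
                · exact List.mem_append.2 (Or.inl (h2 s (by omega) hsr))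
                · have : s = r := by omega
                  subst this
                  exact List.mem_append.2 (Or.inr (by simp))
              · intro h0
                refine ⟨by omega, ?_⟩
                intro s hs1 hs2
                by_cases hsr : s < r
                · exact List.mem_append.2 (Or.inl (h2 s (by omega) hsr))
                · have : s = r := by omega
                  subst this
                  exact List.mem_append.2 (Or.inr (by simp))
            · rw [if_neg hmem] at hp
              have := hI.1 x p hp
              constructor
              · intro h0
                obtain ⟨ha, hb⟩ := this.1 h0
                exact ⟨ha, fun s hs1 hs2 => List.mem_append.2 (Or.inl (hb s hs1 hs2))⟩
              · intro h0
                obtain ⟨ha, hb⟩ := this.2 h0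
                exact ⟨ha, fun s hs1 hs2 => List.mem_append.2 (Or.inl (hb s hs1 hs2))⟩
        · intro x
          rw [hchar x]
          by_cases hx : x = r
          · subst hx
            simp
          · rw [if_neg hx]
            by_cases hmem : x ∈ out.1
            · rw [if_pos hmem]
              obtain ⟨hx1, hx2⟩ := hrangeout x hmem
              have hxr : x < r := lt_of_le_of_ne hx2 hx
              simp only [Option.isSome_some, iff_true]
              exact List.mem_append.2 (Or.inl (h2 x hx1 hxr))
            · rw [if_neg hmem]
              constructor
              · intro hin
                rcases List.mem_append.1 hin with h' | h'
                · exact (hI.2.1 x).1 h'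
                · simp at h'; exact absurd h' hx
              · intro hsome
                exact List.mem_append.2 (Or.inl ((hI.2.1 x).2 hsome))
        · have hrnone : memo.get? r = none := by
            rcases h : memo.get? r with _ | p
            · rfl
            · exact absurd ((hI.2.1 r).2 (by rw [h]; rfl)) hrnot
          have := size_gain out.1 (r + 1) (r + 1) r memo hrnone
          rw [hmemoA]
          simp only [List.length_append, List.length_cons, List.length_nil]
          have h2' := hI.2.2
          omega
      · exact cinv_step processed occ num r hC h1 h2 hrnot
      · rw [← hassoc]; exact hD

-- ===== VERDICT (by name: the statement is the Claim_ definition above) =====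
theorem solution_spec : Claim_equal_solution := by
  intro k rn _hDom hPre
  unfold Spec_solution
  have hP0 : Pre_solution 0 rn := hPre
  have h := loop_eq rn [] PySem.Dict.empty PySem.Set.empty []
    (by
      refine ⟨?_, ?_, ?_⟩
      · intro r p hp; simp [PySem.Dict.empty, PySem.Dict.get?] at hp
      · intro r; simp [PySem.Dict.empty, PySem.Dict.get?, PySem.Set.empty]
      · simp [PySem.Dict.empty, PySem.Dict.size, PySem.Set.empty])
    (by
      intro m s hms hcov hfree
      exact absurd (hcov m le_rfl hms) (by simp [PySem.Set.empty]))
    (by simpa using hP0)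
  exact h
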